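-- pv_equiv track=rewrite | github.com/yuchan509/Algorithm | etc/practice.py | solution
-- ===== SOURCE A (Python) =====
-- def solution(n, second, text):
--
--     q = []
--     text = text.replace(' ', '_')
--
--     for i in range(second):
--
--         idx = i % n
--         if text[idx] in q:
--             q.remove(text[idx])
--
--         else:
--             q.append(text[idx])
--
--     chk = (second - 1) // n
--
--     for _ in range(n - len(q)):
--         if chk % 2 == 0:
--             q.insert(0, '_')
--         else:
--             q.append('_')
--
--     ans = ''.join(q)
--
--     return ans
-- ===== SOURCE B (Python) =====
-- def _toggle(q, c):
--     if c in q: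
--         q.remove(c)
--     else:
--         q.append(c)
--
--
-- def solution(n, second, text):
--     # One full pass of the first n characters over the empty queue is an
--     # involution: two full passes return the queue to empty.  So only the
--     # parity of the number of full passes and the leftover second % n toggle
--     # steps matter -- O(n) toggle steps instead of O(second).
--     text = text.replace(' ', '_')
--     period = list(text[:n])
--     full, r = divmod(max(second, 0), n)   # range(second) performs max(second, 0) steps
--     q = []
--     for c in (period if full % 2 == 1 else []) + period[:r]:
--         _toggle(q, c)
--     pad = '_' * (n - len(q))
--     if ((second - 1) // n) % 2 == 0:
--         return pad + ''.join(q)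
--     return ''.join(q) + pad
-- ===== Notes on version B (the rewrite author's own statement) =====
-- stated objective: faster
-- what changed: Instead of simulating all `second` toggle steps, B uses that a full pass of the n-character period over the empty queue is period-2 (two full passes restore the empty queue), so it performs only (second//n mod 2) full passes plus the leftover second%n toggle steps and builds the padding string directly.
-- outside the precondition, e.g. on solution(-2, 2, 'ab'): A returns 'ab', B returns ''
import Mathlib
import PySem

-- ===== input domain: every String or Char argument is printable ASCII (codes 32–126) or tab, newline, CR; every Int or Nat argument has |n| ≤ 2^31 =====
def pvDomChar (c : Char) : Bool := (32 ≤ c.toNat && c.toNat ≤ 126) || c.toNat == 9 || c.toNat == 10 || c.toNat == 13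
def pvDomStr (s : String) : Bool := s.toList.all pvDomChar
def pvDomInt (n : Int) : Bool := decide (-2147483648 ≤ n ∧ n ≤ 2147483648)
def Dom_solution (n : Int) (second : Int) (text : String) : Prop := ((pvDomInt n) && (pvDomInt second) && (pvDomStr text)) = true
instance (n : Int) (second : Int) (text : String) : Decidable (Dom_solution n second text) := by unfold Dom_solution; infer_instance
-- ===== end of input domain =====

-- B replaces the O(second·n) step-by-step simulation by parity of full passes plus the
-- leftover second % n toggle steps (a full pass over the empty queue is period-2): faster.

-- ===== PORT A =====
-- literal transliteration of A: fold over range(second); text[i % n] via pyGet? (none = IndexError,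
-- threaded through an Option; n = 0 would be a ZeroDivisionError in Python — both excluded by Pre_).
-- q is Python's list of 1-character strings, held as List Char; ''.join(q) is String.ofList;
-- q.insert(0, '_') at index 0 is cons.
def solution (n : Int) (second : Int) (text : String) : String :=
  let t := PySem.Str.replace text " " "_"
  let qOpt : Option (List Char) :=
    (PySem.List.pyRange 0 second 1).foldl (fun acc i =>
      match acc with
      | none => none
      | some q =>
        match PySem.Str.pyGet? t (PySem.Int.mod i n) with
        | none => none
        | some c => if c ∈ q then some (q.erase c) else some (q ++ [c])) (some [])
  match qOpt with
  | none => ""      -- unreachable under Pre_solution (Python raises here)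
  | some q =>
    let chk := PySem.Int.floordiv (second - 1) n
    let q2 := (PySem.List.pyRange 0 (n - (q.length : Int)) 1).foldl
      (fun q _ => if PySem.Int.mod chk 2 = 0 then '_' :: q else q ++ ['_']) q
    String.ofList q2

-- ===== PORT B =====
-- Source B's helper _toggle
def pvToggle (q : List Char) (c : Char) : List Char :=
  if c ∈ q then q.erase c else q ++ [c]

-- literal transliteration of B: period = list(text[:n]); full, r = divmod(max(second, 0), n)
-- (None at n = 0 — ZeroDivisionError, excluded by Pre_); '_' * k is List.replicate k.toNat
-- ('' for negative k, as in Python).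
def solution_alt (n : Int) (second : Int) (text : String) : String :=
  let t := PySem.Str.replace text " " "_"
  let period := PySem.List.slice t.toList none (some n)
  match PySem.Int.divmod? (max second 0) n with
  | none => ""    -- unreachable under Pre_solution (Python raises here)
  | some (full, r) =>
    let q := ((if PySem.Int.mod full 2 = 1 then period else []) ++
              PySem.List.slice period none (some r)).foldl pvToggle []
    let pad := List.replicate (n - (q.length : Int)).toNat '_'
    if PySem.Int.mod (PySem.Int.floordiv (second - 1) n) 2 = 0 then
      String.ofList (pad ++ q)
    else
      String.ofList (q ++ pad)

-- ===== PRECONDITION & SPEC =====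
-- Pre_ admits the natural domain: any input with second ≤ 0 (the loop does not run; n ≠ 0
-- because chk = (second - 1) // n raises ZeroDivisionError), and otherwise a positive period
-- length n with enough text for every accessed index (A raises IndexError when
-- min(second, n) > len(text) and ZeroDivisionError when n = 0).  It excludes n < 0 with
-- second > 0, where A reads text backwards by Python's negative-index wraparound — there A
-- still returns a value (see the cite in the claim).
def Pre_solution (n : Int) (second : Int) (text : String) : Prop :=
  (second ≤ 0 ∧ n ≠ 0) ∨ (1 ≤ n ∧ 0 ≤ second ∧ min second n ≤ (text.toList.length : Int))
instance (n : Int) (second : Int) (text : String) : Decidable (Pre_solution n second text) := by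
  unfold Pre_solution; infer_instance

def pvWitness_solution : Int × Int × String := (2, 5, "abc")

def Spec_solution (n : Int) (second : Int) (text : String) (out : String) : Prop := out = solution_alt n second text
instance (n : Int) (second : Int) (text : String) (out : String) : Decidable (Spec_solution n second text out) := by unfold Spec_solution; infer_instance

-- ===== CLAIM (what is proved, stated in full; the proofs are below) =====
def Claim_equal_solution : Prop := ∀ (n : Int) (second : Int) (text : String), Dom_solution n second text → Pre_solution n second text → Spec_solution n second text (solution n second text)

-- ===== LEMMAS AND PROOFS =====

theorem pvReplace_go (fuel : Nat) : ∀ (l acc : List Char), l.length ≤ fuel →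
    PySem.Chars.replace.go [' '] ['_'] fuel l acc
      = acc.reverse ++ l.map (fun c => if c = ' ' then '_' else c) := by
  induction fuel with
  | zero =>
    intro l acc h
    have hl : l = [] := by simpa using h
    subst hl; rw [PySem.Chars.replace.go]; simp
  | succ fuel ih =>
    intro l acc h
    cases l with
    | nil =>
      rw [PySem.Chars.replace.go]
      · simp
      · omega
    | cons c t =>
      rw [PySem.Chars.replace.go]
      by_cases hc : c = ' '
      · subst hc
        have hp : List.isPrefixOf [' '] (' ' :: t) = true := by simp [List.isPrefixOf]
        simp only [hp, if_pos]
        rw [show List.drop [' '].length (' ' :: t) = t from rfl,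
            ih t _ (by simpa using Nat.le_of_succ_le_succ h)]
        simp
      · have hp : List.isPrefixOf [' '] (c :: t) = false := by
          simp [List.isPrefixOf]
          exact fun h' => absurd h'.symm hc
        simp only [hp, Bool.false_eq_true, if_false]
        rw [ih t _ (by simpa using Nat.le_of_succ_le_succ h)]
        simp [hc]

theorem pvReplace_space (s : List Char) :
    PySem.Chars.replace s [' '] ['_'] = s.map (fun c => if c = ' ' then '_' else c) := by
  rw [PySem.Chars.replace]
  simp [pvReplace_go s.length s [] (le_refl _)]

theorem pvToggle_spec (q : List Char) (c : Char) (h : q.Nodup) :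
    (pvToggle q c).Nodup ∧ ∀ x, x ∈ pvToggle q c ↔ (if x = c then x ∉ q else x ∈ q) := by
  unfold pvToggle
  by_cases hm : c ∈ q
  · simp only [hm, if_pos]
    refine ⟨h.erase c, fun x => ?_⟩
    rw [h.mem_erase_iff]
    by_cases hx : x = c <;> simp [hx, hm]
  · simp only [hm, if_false]
    refine ⟨by simp [List.nodup_append, h]; exact fun a ha hac => hm (hac ▸ ha), fun x => ?_⟩
    by_cases hx : x = c <;> simp [hx, hm]

theorem pvT_spec (l : List Char) : ∀ (q : List Char), q.Nodup →
    (List.foldl pvToggle q l).Nodup ∧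
      ∀ x, x ∈ List.foldl pvToggle q l ↔ ((x ∈ q) ↔ l.count x % 2 = 0) := by
  induction l with
  | nil => intro q h; simp [h]
  | cons a l ih =>
    intro q h
    obtain ⟨hn, hm⟩ := pvToggle_spec q a h
    obtain ⟨hn', hm'⟩ := ih (pvToggle q a) hn
    refine ⟨hn', fun x => ?_⟩
    rw [List.foldl_cons, hm' x, hm x]
    by_cases hx : x = a
    · subst hx
      have hpar : (List.count x l + 1) % 2 = 0 ↔ ¬ (List.count x l % 2 = 0) := by omega
      simp only [List.count_cons_self, if_true, hpar]
      tauto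
    · simp [hx, List.count_cons_of_ne (by exact fun hh => hx hh.symm ) ]

theorem pvT_nil (s : List Char) :
    List.foldl pvToggle (List.foldl pvToggle ([] : List Char) s) s = [] := by
  obtain ⟨hn1, hm1⟩ := pvT_spec s [] List.nodup_nil
  obtain ⟨hn2, hm2⟩ := pvT_spec s _ hn1
  rw [List.eq_nil_iff_forall_not_mem]
  intro x hx
  rw [hm2 x, hm1 x] at hx
  simp at hx
  omega

theorem pvFold_cons {α : Type} (l : List α) : ∀ q : List Char,
    List.foldl (fun q _ => '_' :: q) q l = List.replicate l.length '_' ++ q := by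
  induction l with
  | nil => intro q; simp
  | cons a l ih =>
    intro q
    rw [List.foldl_cons, ih]
    simp [List.replicate_succ' , List.append_assoc]

theorem pvFold_app {α : Type} (l : List α) : ∀ q : List Char,
    List.foldl (fun q _ => q ++ ['_']) q l = q ++ List.replicate l.length '_' := by
  induction l with
  | nil => intro q; simp
  | cons a l ih =>
    intro q
    rw [List.foldl_cons, ih]
    simp [List.replicate_succ]

theorem pvSeq_add (cs : List Char) (N c : Nat) :
    (List.range (N + c)).map (fun i => cs.getD (i % N) '_')
      = (List.range N).map (fun i => cs.getD (i % N) '_')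
        ++ (List.range c).map (fun i => cs.getD (i % N) '_') := by
  rw [List.range_add, List.map_append, List.map_map]
  congr 1
  apply List.map_congr_left
  intro i _
  simp [Nat.add_mod_left]

theorem pvSeq_take (cs : List Char) (N c : Nat) (hc : c ≤ N) (hcl : c ≤ cs.length) :
    (List.range c).map (fun i => cs.getD (i % N) '_') = cs.take c := by
  apply List.ext_getElem
  · simp [hcl]
  · intro i h1 h2
    simp only [List.getElem_map, List.getElem_range, List.getElem_take]
    rw [Nat.mod_eq_of_lt (by simp at h1; omega)]
    rw [List.getD_eq_getElem cs '_' (by simp at h1 ⊢; omega)]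

theorem pvPeriods (cs : List Char) (N : Nat) (hNl : N ≤ cs.length) :
    ∀ (a b : Nat),
    List.foldl pvToggle [] ((List.range (a*N + b)).map (fun i => cs.getD (i % N) '_'))
      = List.foldl pvToggle
          (if a % 2 = 1 then List.foldl pvToggle [] (cs.take N) else [])
          ((List.range b).map (fun i => cs.getD (i % N) '_')) := by
  intro a
  induction a using Nat.strong_induction_on with
  | _ a ih =>
    match a with
    | 0 => intro b; simp
    | 1 =>
      intro b
      rw [show 1*N + b = N + b by ring, pvSeq_add cs N b, List.foldl_append,
          pvSeq_take cs N N (le_refl _) hNl]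
      simp
    | (a+2) =>
      intro b
      rw [show (a+2)*N + b = N + (N + (a*N + b)) by ring,
          pvSeq_add cs N _, List.foldl_append,
          pvSeq_add cs N _, List.foldl_append,
          pvSeq_take cs N N (le_refl _) hNl, pvT_nil, ih a (by omega) b]
      have h2 : (a+2) % 2 = a % 2 := by omega
      rw [h2]

theorem pvT_subset (l : List Char) : ∀ q : List Char, List.foldl pvToggle q l ⊆ q ++ l := by
  induction l with
  | nil => intro q; simp
  | cons a l ih =>
    intro q
    rw [List.foldl_cons]
    intro x hx
    have := ih (pvToggle q a) hx
    simp only [List.mem_append] at this ⊢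
    rcases this with h | h
    · unfold pvToggle at h
      split at h
      · exact Or.inl (List.mem_of_mem_erase h)
      · simp at h
        rcases h with h | h
        · exact Or.inl h
        · subst h; simp
    · simp [h]

theorem pvAfold (t : String) (n : Int) (N : Nat) (hn : n = (N : Int))
    (l : List Nat) (hl : ∀ i ∈ l, i % N < t.toList.length) : ∀ (q : List Char),
    (l.map (fun i : Nat => (i : Int))).foldl
       (fun acc i => match acc with
         | none => none
         | some q => match PySem.Str.pyGet? t (PySem.Int.mod i n) with
           | none => none
           | some c => if c ∈ q then some (q.erase c) else some (q ++ [c])) (some q)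
     = some (List.foldl pvToggle q (l.map (fun i => t.toList.getD (i % N) '_'))) := by
  induction l with
  | nil => intro q; simp
  | cons a l ih =>
    intro q
    have ha : a % N < t.toList.length := hl a (by simp)
    rw [List.map_cons, List.foldl_cons, List.map_cons, List.foldl_cons]
    have hg : PySem.Str.pyGet? t (PySem.Int.mod (a : Int) n)
        = some (t.toList.getD (a % N) '_') := by
      rw [hn, PySem.Int.mod_natCast]
      simp only [PySem.Str.pyGet?_natCast]
      rw [List.getElem?_eq_getElem ha, List.getD_eq_getElem t.toList '_' ha]
    rw [hg]
    have hstep : (match some q with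
        | none => none
        | some (q : List Char) =>
          match some (t.toList.getD (a % N) '_') with
          | none => none
          | some c => if c ∈ q then some (q.erase c) else some (q ++ [c]))
        = some (pvToggle q (t.toList.getD (a % N) '_')) := by
      simp only [pvToggle]
      split <;> rfl
    rw [hstep]
    exact ih (fun i hi => hl i (by simp [hi])) _


theorem pvMain (n : Int) (second : Int) (text : String)
    (hpre : Pre_solution n second text) :
    solution n second text = solution_alt n second text := by
  rcases hpre with ⟨hs0', hn0⟩ | ⟨hn1, hs0, hmin⟩
  · -- second ≤ 0: A's loop body never runs and the queue stays empty
    have hrange : PySem.List.pyRange 0 second 1 = [] := by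
      simp [PySem.List.pyRange]; intro h'; omega
    have hdm : PySem.Int.divmod? (max second 0) n = some (0, 0) := by
      rw [show max second 0 = 0 by omega, PySem.Int.divmod?, if_neg hn0]
      simp [Int.zero_fdiv, Int.zero_fmod]
    rw [solution, solution_alt, hrange, hdm]
    simp only [List.foldl_nil]
    rw [PySem.List.slice_to _ (le_refl (0 : Int))]
    simp only [Int.toNat_zero, List.take_zero, List.append_nil,
      show ¬ (PySem.Int.mod (0 : Int) 2 = 1) by decide, if_false, List.foldl_nil]
    by_cases hn' : 1 ≤ n
    · have h0 : n - ((([] : List Char)).length : Int) = ((n.toNat : Nat) : Int) := by simp; omega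
      rw [h0, PySem.List.pyRange_zero_natCast]
      by_cases hc : PySem.Int.mod (PySem.Int.floordiv (second - 1) n) 2 = 0
      · simp only [hc, if_true]
        rw [pvFold_cons]
        simp
        rw [show (max n 0).toNat = n.toNat from by omega]
      · simp only [hc, if_false]
        rw [pvFold_app]
        simp
        rw [show (max n 0).toNat = n.toNat from by omega]
    · have hneg : PySem.List.pyRange 0 (n - ((([] : List Char)).length : Int)) 1 = [] := by
        simp only [List.length_nil, Int.natCast_zero, sub_zero]
        simp [PySem.List.pyRange]; intro h'; omega
      rw [hneg]
      simp only [List.foldl_nil]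
      have hpad : (n - ((([] : List Char)).length : Int)).toNat = 0 := by simp; omega
      rw [hpad]
      simp
  set N := n.toNat with hNdef
  set S := second.toNat with hSdef
  have hn : n = (N : Int) := by omega
  have hs : second = (S : Int) := by omega
  have hN : 0 < N := by omega
  set t := PySem.Str.replace text " " "_" with ht
  set cs := t.toList with hcs
  have hlen : cs.length = text.toList.length := by
    rw [hcs, ht, PySem.Str.toList_replace,
        show (" " : String).toList = [' '] from rfl,
        show ("_" : String).toList = ['_'] from rfl,
        pvReplace_space]
    simp
  have hminN : min S N ≤ cs.length := by
    rw [hlen]; omega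
  -- the common toggled queue
  set f : Nat → Char := fun i => cs.getD (i % N) '_' with hf
  set qf : List Char := List.foldl pvToggle [] ((List.range S).map f) with hqf
  -- A's option-threaded fold computes qf
  have hA : solution n second text =
      String.ofList ((PySem.List.pyRange 0 (n - (qf.length : Int)) 1).foldl
        (fun q _ => if PySem.Int.mod (PySem.Int.floordiv (second - 1) n) 2 = 0
                    then '_' :: q else q ++ ['_']) qf) := by
    rw [solution]
    rw [hs, PySem.List.pyRange_zero_natCast]
    rw [pvAfold t n N hn (List.range S)
        (by intro i hi; simp only [List.mem_range] at hi
            have h1 := Nat.mod_lt i hN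
            have h2 : min S N ≤ t.toList.length := hminN
            have h3 := Nat.mod_le i N
            omega) []]
  -- B's queue is also qf
  have hdm : PySem.Int.divmod? (max second 0) n
      = some (((S / N : Nat) : Int), ((S % N : Nat) : Int)) := by
    rw [show max second 0 = second by omega, PySem.Int.divmod?, if_neg (by omega : ¬ n = 0), hs, hn]
    rw [show (S : Int).fdiv (N : Int) = PySem.Int.floordiv (S : Int) (N : Int) from rfl,
        show (S : Int).fmod (N : Int) = PySem.Int.mod (S : Int) (N : Int) from rfl,
        PySem.Int.floordiv_natCast, PySem.Int.mod_natCast]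
  have hperiod : PySem.List.slice cs none (some n) = cs.take N := by
    rw [PySem.List.slice_to cs (by omega : (0:Int) ≤ n), hn, Int.toNat_natCast]
  have hrslice : PySem.List.slice (cs.take N) none (some ((S % N : Nat) : Int))
      = cs.take (S % N) := by
    rw [PySem.List.slice_to _ (by positivity), Int.toNat_natCast, List.take_take,
        Nat.min_eq_left (le_of_lt (Nat.mod_lt S hN))]
  have hpar : (PySem.Int.mod ((S / N : Nat) : Int) 2 = 1) ↔ ((S / N) % 2 = 1) := by
    rw [show (2 : Int) = ((2 : Nat) : Int) from rfl, PySem.Int.mod_natCast]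
    exact_mod_cast Iff.rfl
  have hB : solution_alt n second text =
      (let q := ((if (S / N) % 2 = 1 then cs.take N else []) ++ cs.take (S % N)).foldl pvToggle [];
       let pad := List.replicate (n - (q.length : Int)).toNat '_';
       if PySem.Int.mod (PySem.Int.floordiv (second - 1) n) 2 = 0 then
         String.ofList (pad ++ q)
       else String.ofList (q ++ pad)) := by
    rw [solution_alt]
    simp only [← ht, ← hcs, hdm, hperiod, hrslice, hpar]
  -- qf equals B's queue
  have hq : ((if (S / N) % 2 = 1 then cs.take N else []) ++ cs.take (S % N)).foldl pvToggle []
      = qf := by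
    rw [hqf]
    by_cases hcase : S < N
    · have h1 : S / N = 0 := Nat.div_eq_of_lt hcase
      have h2 : S % N = S := Nat.mod_eq_of_lt hcase
      rw [h1, h2]
      rw [pvSeq_take cs N S (by omega) (by omega)]
      simp
    · have hNl : N ≤ cs.length := by omega
      have hdecomp : S / N * N + S % N = S := by
        rw [mul_comm]; exact Nat.div_add_mod S N
      conv_rhs => rw [← hdecomp]
      rw [pvPeriods cs N hNl (S / N) (S % N),
          pvSeq_take cs N (S % N) (le_of_lt (Nat.mod_lt S hN)) (by have := Nat.mod_lt S hN; omega)]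
      by_cases hp : (S / N) % 2 = 1
      · simp only [hp, if_true, List.foldl_append]
      · simp only [hp, if_false, List.nil_append]
  rw [hq] at hB
  -- queue is a nodup sublist of the first N characters, so its length is at most N
  have hnodup : qf.Nodup := (pvT_spec ((List.range S).map f) [] List.nodup_nil).1
  have hsub : qf ⊆ cs.take N := by
    rw [← hq]
    intro x hx
    have := pvT_subset _ [] hx
    simp only [List.nil_append, List.mem_append] at this
    rcases this with h | h
    · split at h
      · exact h
      · simp at h
    · have : x ∈ cs.take N := by
        have hsN : cs.take (S % N) = (cs.take N).take (S % N) := by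
          rw [List.take_take, Nat.min_eq_left (le_of_lt (Nat.mod_lt S hN))]
        rw [hsN] at h
        exact List.take_subset _ _ h
      exact this
  have hlenq : qf.length ≤ N := by
    calc qf.length = qf.toFinset.card := (List.toFinset_card_of_nodup hnodup).symm
    _ ≤ (cs.take N).toFinset.card := Finset.card_le_card (by
          intro x hx; rw [List.mem_toFinset] at hx ⊢; exact hsub hx)
    _ ≤ (cs.take N).length := List.toFinset_card_le _
    _ ≤ N := by simp
  -- padding
  have hkr : PySem.List.pyRange 0 (n - (qf.length : Int)) 1
      = (List.range (N - qf.length)).map (fun k : Nat => (k : Int)) := by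
    rw [show n - (qf.length : Int) = ((N - qf.length : Nat) : Int) by omega,
        PySem.List.pyRange_zero_natCast]
  have hpadnat : (n - (qf.length : Int)).toNat = N - qf.length := by omega
  rw [hA, hB]
  simp only [hkr, hpadnat]
  by_cases hc : PySem.Int.mod (PySem.Int.floordiv (second - 1) n) 2 = 0
  · simp only [hc, if_true]
    rw [pvFold_cons]
    simp
  · simp only [hc, if_false]
    rw [pvFold_app]
    simp

-- ===== VERDICT (by name: the statement is the Claim_ definition above) =====
theorem solution_spec : Claim_equal_solution := by
  intro n second text _ hpre
  unfold Spec_solution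
  exact pvMain n second text hpre
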